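-- pv_equiv track=rewrite | github.com/smmatwork/homeOps | services/agent-service/agents/chore_agent.py | _format_no_match_with_suggestions
-- ===== SOURCE A (Python) =====
-- def _extract_spaces_from_facts(facts: str, keyword: str = "") -> list[str]:
--     """Pull room/space names from the FACTS section, optionally filtered by keyword."""
--     spaces: list[str] = []
--     kw = keyword.lower().strip()
--     for line in (facts or "").split("\n"):
--         # Format: "Spaces: Kitchen, Living Room, Master Bathroom-Attached Master Bedroom, ..."
--         if line.startswith("Spaces:") or line.startswith("Rooms:"):
--             raw = line.split(":", 1)[1].strip()
--             for name in raw.split(","):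
--                 name = name.strip()
--                 if name and (not kw or kw in name.lower()):
--                     spaces.append(name)
--     return spaces
--
-- def _format_no_match_with_suggestions(
--     match_text: str,
--     facts: str,
-- ) -> str:
--     """Format a helpful no-match message with similar space/room suggestions."""
--     # Try each word in match_text as a keyword to find similar spaces
--     words = match_text.lower().split() if match_text else []
--     similar: list[str] = []
--     for word in words:
--         if len(word) >= 3:  # skip short words like "the", "a"
--             similar = _extract_spaces_from_facts(facts, word)
--             if similar:
--                 break
--
--     add_hint = (
--         f"\n\nIf \"{match_text}\" is a new room that's not in your home profile yet, "
--         f"you can add it from the **Home Profile** page, or say "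
--         f"*\"add {match_text} to my home profile\"*."
--     )
--
--     if not similar:
--         # Broader search — get all spaces
--         all_spaces = _extract_spaces_from_facts(facts)
--         if all_spaces:
--             space_list = "\n".join(f"  - {s}" for s in all_spaces[:10])
--             more = f"\n  ...and {len(all_spaces) - 10} more" if len(all_spaces) > 10 else ""
--             return (
--                 f"I couldn't find \"{match_text}\" in your home profile. "
--                 f"Here are your current rooms:\n{space_list}{more}\n\n"
--                 f"Did you mean one of these?"
--                 f"{add_hint}"
--             )
--         return (
--             f"I couldn't find \"{match_text}\" in your home profile. "
--             f"Could you give me the exact room name?"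
--             f"{add_hint}"
--         )
--
--     space_list = "\n".join(f"  - {s}" for s in similar[:8])
--     return (
--         f"I couldn't find an exact match for \"{match_text}\" in your home profile. "
--         f"Did you mean one of these?\n{space_list}\n\n"
--         f"Tell me which one and I'll proceed."
--         f"{add_hint}"
--     )
-- ===== SOURCE B (Python) =====
-- def _parse_spaces(facts: str) -> list[str]:
--     """All space/room names from the FACTS section, in order, parsed once."""
--     return [name
--             for line in (facts or "").split("\n")
--             if line.startswith("Spaces:") or line.startswith("Rooms:")
--             for name in map(str.strip, line.split(":", 1)[1].strip().split(","))
--             if name]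
--
--
-- def _bullets(items: list[str], cap: int) -> str:
--     return "\n".join(f"  - {s}" for s in items[:cap])
--
--
-- def _format_no_match_with_suggestions(match_text: str, facts: str) -> str:
--     """Format a helpful no-match message with similar space/room suggestions."""
--     names = _parse_spaces(facts)
--     words = match_text.lower().split() if match_text else []
--     similar = next(
--         (m for m in ([s for s in names if w in s.lower()]
--                      for w in words if len(w) >= 3) if m),
--         [],
--     )
--
--     if similar:
--         body = (
--             f"I couldn't find an exact match for \"{match_text}\" in your home profile. "
--             f"Did you mean one of these?\n{_bullets(similar, 8)}\n\n"
--             f"Tell me which one and I'll proceed."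
--         )
--     elif names:
--         more = f"\n  ...and {len(names) - 10} more" if len(names) > 10 else ""
--         body = (
--             f"I couldn't find \"{match_text}\" in your home profile. "
--             f"Here are your current rooms:\n{_bullets(names, 10)}{more}\n\n"
--             f"Did you mean one of these?"
--         )
--     else:
--         body = (
--             f"I couldn't find \"{match_text}\" in your home profile. "
--             f"Could you give me the exact room name?"
--         )
--
--     return body + (
--         f"\n\nIf \"{match_text}\" is a new room that's not in your home profile yet, "
--         f"you can add it from the **Home Profile** page, or say "
--         f"*\"add {match_text} to my home profile\"*."
--     )
-- ===== Notes on version B (the rewrite author's own statement) =====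
-- stated objective: simpler
-- what changed: B parses the space/room names out of facts once with a single comprehension, picks the first word whose filter of that pre-built list is non-empty (next over a generator instead of A's accumulator loop that re-runs the full facts scanner per word), and builds one body string appending the hint once instead of per-branch message construction.
import Mathlib
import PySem

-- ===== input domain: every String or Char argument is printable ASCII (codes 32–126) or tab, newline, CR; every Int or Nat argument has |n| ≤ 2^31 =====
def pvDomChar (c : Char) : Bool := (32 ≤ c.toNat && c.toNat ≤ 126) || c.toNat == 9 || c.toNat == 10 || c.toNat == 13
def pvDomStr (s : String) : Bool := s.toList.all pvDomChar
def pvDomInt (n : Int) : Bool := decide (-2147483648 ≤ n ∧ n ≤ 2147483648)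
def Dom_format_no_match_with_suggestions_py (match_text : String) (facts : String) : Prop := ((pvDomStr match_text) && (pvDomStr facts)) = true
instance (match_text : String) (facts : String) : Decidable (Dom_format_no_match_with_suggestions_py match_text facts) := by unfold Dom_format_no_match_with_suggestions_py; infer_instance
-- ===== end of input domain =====

-- B parses the space names out of `facts` once (a single comprehension) and picks the first
-- word whose filter of that list is non-empty, then assembles one body string and appends the
-- hint once, instead of A's per-word re-scan of `facts` and per-branch message building;
-- objective: simpler.

-- ===== PORT A =====
-- port of _extract_spaces_from_facts (A re-runs it per word, and once more for the fallback)
def pvExtractA (facts : String) (keyword : String) : List String :=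
  let kw := PySem.Str.strip (PySem.Str.lower keyword)
  ((PySem.Str.split? facts "\n").getD []).foldl (fun spaces line =>
    if PySem.Str.startswith line "Spaces:" || PySem.Str.startswith line "Rooms:" then
      let raw := PySem.Str.strip (PySem.List.pyGetD ((PySem.Str.splitMax? line ":" 1).getD []) 1 "")
      ((PySem.Str.split? raw ",").getD []).foldl (fun sp nm =>
        let name := PySem.Str.strip nm
        if name != "" && (kw == "" || PySem.Str.isIn kw (PySem.Str.lower name)) then sp ++ [name]
        else sp) spaces
    else spaces) []

-- A's word loop: `similar = _extract_spaces_from_facts(facts, word); if similar: break`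
def pvSimilarA (facts : String) : List String → List String → List String
  | [], similar => similar
  | w :: ws, similar =>
    if 3 ≤ PySem.Str.len w then
      let s := pvExtractA facts w
      if s ≠ [] then s else pvSimilarA facts ws s
    else pvSimilarA facts ws similar

def format_no_match_with_suggestions_py (match_text : String) (facts : String) : String :=
  let words := if match_text != "" then PySem.Str.split₀ (PySem.Str.lower match_text) else []
  let similar := pvSimilarA facts words []
  let add_hint := "\n\nIf \"" ++ match_text ++ "\" is a new room that's not in your home profile yet, you can add it from the **Home Profile** page, or say *\"add " ++ match_text ++ " to my home profile\"*."
  if similar = [] then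
    let all_spaces := pvExtractA facts ""
    if all_spaces ≠ [] then
      let space_list := PySem.Str.join "\n" ((PySem.List.slice all_spaces none (some 10)).map (fun s => "  - " ++ s))
      let more := if 10 < (all_spaces.length : Int) then "\n  ...and " ++ PySem.Int.toStr ((all_spaces.length : Int) - 10) ++ " more" else ""
      "I couldn't find \"" ++ match_text ++ "\" in your home profile. Here are your current rooms:\n" ++ space_list ++ more ++ "\n\nDid you mean one of these?" ++ add_hint
    else
      "I couldn't find \"" ++ match_text ++ "\" in your home profile. Could you give me the exact room name?" ++ add_hint
  else
    let space_list := PySem.Str.join "\n" ((PySem.List.slice similar none (some 8)).map (fun s => "  - " ++ s))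
    "I couldn't find an exact match for \"" ++ match_text ++ "\" in your home profile. Did you mean one of these?\n" ++ space_list ++ "\n\nTell me which one and I'll proceed." ++ add_hint

-- ===== PORT B =====
-- B's _parse_spaces: one comprehension over the lines
def pvParseB (facts : String) : List String :=
  ((PySem.Str.split? facts "\n").getD []).flatMap (fun line =>
    if PySem.Str.startswith line "Spaces:" || PySem.Str.startswith line "Rooms:" then
      ((((PySem.Str.split? (PySem.Str.strip (PySem.List.pyGetD ((PySem.Str.splitMax? line ":" 1).getD []) 1 "")) ",").getD []).map PySem.Str.strip).filter (fun n => n != ""))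
    else [])

-- B's _bullets helper
def pvBullets (items : List String) (cap : Int) : String :=
  PySem.Str.join "\n" ((PySem.List.slice items none (some cap)).map (fun s => "  - " ++ s))

-- B's `next((m for m in (...filters...) if m), [])`: first non-empty filter result
def pvFirstMatch (names : List String) : List String → List String
  | [] => []
  | w :: ws =>
    if 3 ≤ PySem.Str.len w then
      match names.filter (fun n => PySem.Str.isIn w (PySem.Str.lower n)) with
      | [] => pvFirstMatch names ws
      | m => m
    else pvFirstMatch names ws

def format_no_match_with_suggestions_py_alt (match_text : String) (facts : String) : String :=
  let names := pvParseB facts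
  let similar := pvFirstMatch names (if match_text != "" then PySem.Str.split₀ (PySem.Str.lower match_text) else [])
  let body :=
    if similar ≠ [] then
      "I couldn't find an exact match for \"" ++ match_text ++ "\" in your home profile. Did you mean one of these?\n" ++ pvBullets similar 8 ++ "\n\nTell me which one and I'll proceed."
    else if names ≠ [] then
      let more := if 10 < (names.length : Int) then "\n  ...and " ++ PySem.Int.toStr ((names.length : Int) - 10) ++ " more" else ""
      "I couldn't find \"" ++ match_text ++ "\" in your home profile. Here are your current rooms:\n" ++ pvBullets names 10 ++ more ++ "\n\nDid you mean one of these?"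
    else
      "I couldn't find \"" ++ match_text ++ "\" in your home profile. Could you give me the exact room name?"
  body ++ ("\n\nIf \"" ++ match_text ++ "\" is a new room that's not in your home profile yet, you can add it from the **Home Profile** page, or say *\"add " ++ match_text ++ " to my home profile\"*.")

-- ===== PRECONDITION & SPEC =====
def Spec_format_no_match_with_suggestions_py (match_text : String) (facts : String) (out : String) : Prop := out = format_no_match_with_suggestions_py_alt match_text facts
instance (match_text : String) (facts : String) (out : String) : Decidable (Spec_format_no_match_with_suggestions_py match_text facts out) := by unfold Spec_format_no_match_with_suggestions_py; infer_instance

-- ===== CLAIM (what is proved, stated in full; the proofs are below) =====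
def Claim_equal_format_no_match_with_suggestions_py : Prop := ∀ (match_text : String) (facts : String), Dom_format_no_match_with_suggestions_py match_text facts → Spec_format_no_match_with_suggestions_py match_text facts (format_no_match_with_suggestions_py match_text facts)

-- ===== LEMMAS AND PROOFS =====

-- the per-line list of cleaned comma pieces
def pvPieces (line : String) : List String :=
  (((PySem.Str.split? (PySem.Str.strip (PySem.List.pyGetD ((PySem.Str.splitMax? line ":" 1).getD []) 1 "")) ",").getD []).map PySem.Str.strip)

lemma pvParseB_eq (facts : String) :
    pvParseB facts = ((PySem.Str.split? facts "\n").getD []).flatMap (fun line =>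
      if PySem.Str.startswith line "Spaces:" || PySem.Str.startswith line "Rooms:" then
        (pvPieces line).filter (fun n => n != "")
      else []) := rfl

lemma pvExtractA_eq (facts : String) (keyword : String) :
    pvExtractA facts keyword = ((PySem.Str.split? facts "\n").getD []).flatMap (fun line =>
      if PySem.Str.startswith line "Spaces:" || PySem.Str.startswith line "Rooms:" then
        (pvPieces line).filter (fun n =>
          n != "" && (PySem.Str.strip (PySem.Str.lower keyword) == "" ||
            PySem.Str.isIn (PySem.Str.strip (PySem.Str.lower keyword)) (PySem.Str.lower n)))
      else []) := by
  simp only [pvExtractA]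
  have hstep : (fun (spaces : List String) line =>
      if PySem.Str.startswith line "Spaces:" || PySem.Str.startswith line "Rooms:" then
        ((PySem.Str.split? (PySem.Str.strip (PySem.List.pyGetD ((PySem.Str.splitMax? line ":" 1).getD []) 1 "")) ",").getD []).foldl (fun sp nm =>
          let name := PySem.Str.strip nm
          if name != "" && (PySem.Str.strip (PySem.Str.lower keyword) == "" || PySem.Str.isIn (PySem.Str.strip (PySem.Str.lower keyword)) (PySem.Str.lower name)) then sp ++ [name]
          else sp) spaces
      else spaces)
      = fun spaces line => spaces ++ (if PySem.Str.startswith line "Spaces:" || PySem.Str.startswith line "Rooms:" then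
          (pvPieces line).filter (fun n =>
            n != "" && (PySem.Str.strip (PySem.Str.lower keyword) == "" ||
              PySem.Str.isIn (PySem.Str.strip (PySem.Str.lower keyword)) (PySem.Str.lower n))) else []) := by
    funext spaces line
    split
    · rw [PySem.List.foldl_append_if
        (fun nm => PySem.Str.strip nm != "" && (PySem.Str.strip (PySem.Str.lower keyword) == "" || PySem.Str.isIn (PySem.Str.strip (PySem.Str.lower keyword)) (PySem.Str.lower (PySem.Str.strip nm))))
        PySem.Str.strip]
      unfold pvPieces
      rw [List.filter_map]
      rfl
    · simp
  rw [hstep, PySem.List.foldl_append_eq_flatMap]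
  simp

lemma pvExtractA_empty (facts : String) : pvExtractA facts "" = pvParseB facts := by
  rw [pvExtractA_eq, pvParseB_eq]
  simp [show (PySem.Str.strip (PySem.Str.lower "") == "") = true from rfl]

lemma pvExtractA_filter (facts : String) (w : String)
    (hfix : PySem.Str.strip (PySem.Str.lower w) = w) (hne : w ≠ "") :
    pvExtractA facts w = (pvParseB facts).filter (fun n => PySem.Str.isIn w (PySem.Str.lower n)) := by
  rw [pvExtractA_eq, pvParseB_eq, List.filter_flatMap]
  congr 1
  funext line
  rw [hfix]
  have hw : (w == "") = false := by simp [hne]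
  split
  · rw [List.filter_filter]
    simp [hw, Bool.and_comm]
  · simp

lemma pvLowerChar_fix (c : Char) : PySem.Chars.lowerChar (PySem.Chars.lowerChar c) = PySem.Chars.lowerChar c := by
  unfold PySem.Chars.lowerChar PySem.Chars.isupper
  split
  · rename_i h
    simp only [Bool.and_eq_true, decide_eq_true_eq, Char.le_def] at h
    have ha := UInt32.le_iff_toNat_le.mp h.1
    have hb := UInt32.le_iff_toNat_le.mp h.2
    have hA : ('A' : Char).val.toNat = 65 := by decide
    have hZ : ('Z' : Char).val.toNat = 90 := by decide
    rw [hA] at ha; rw [hZ] at hb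
    have hv : (c.toNat + 32).isValidChar := by
      unfold Char.toNat at *
      left; omega
    have h2 : (Char.ofNat (c.toNat + 32)).val.toNat = c.toNat + 32 := by
      have := Char.toNat_ofNat (c.toNat + 32)
      rw [if_pos hv] at this
      exact this
    rw [if_neg]
    intro hx
    simp only [Bool.and_eq_true, decide_eq_true_eq, Char.le_def] at hx
    have := UInt32.le_iff_toNat_le.mp hx.2
    rw [hZ, h2] at this
    unfold Char.toNat at *
    omega
  · rfl

-- invariant of split₀'s worker: every produced character is a non-space character of the input
lemma pvGo_chars (p : Char → Prop) :
    ∀ (s cur : List Char) (acc : List (List Char)),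
      (∀ c ∈ s, PySem.Chars.isspace c = false → p c) →
      (∀ c ∈ cur, PySem.Chars.isspace c = false ∧ p c) →
      (∀ w ∈ acc, ∀ c ∈ w, PySem.Chars.isspace c = false ∧ p c) →
      ∀ w ∈ PySem.Chars.split₀.go s cur acc, ∀ c ∈ w, PySem.Chars.isspace c = false ∧ p c := by
  intro s
  induction s with
  | nil =>
    intro cur acc hs hcur hacc w hw
    simp only [PySem.Chars.split₀.go] at hw
    split at hw
    · rw [List.mem_reverse] at hw
      exact hacc w hw
    · rw [List.mem_reverse, List.mem_cons] at hw
      rcases hw with h | h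
      · subst h
        intro c hc
        exact hcur c (List.mem_reverse.mp hc)
      · exact hacc w h
  | cons d rest ih =>
    intro cur acc hs hcur hacc w hw
    simp only [PySem.Chars.split₀.go] at hw
    have hs' : ∀ c ∈ rest, PySem.Chars.isspace c = false → p c :=
      fun c hc => hs c (List.mem_cons_of_mem _ hc)
    split at hw
    · split at hw
      · exact ih [] acc hs' (by simp) hacc w hw
      · refine ih [] _ hs' (by simp) ?_ w hw
        intro v hv
        rcases List.mem_cons.mp hv with h | h
        · subst h
          intro c hc
          exact hcur c (List.mem_reverse.mp hc)
        · exact hacc v h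
    · rename_i hd
      refine ih (d :: cur) acc hs' ?_ hacc w hw
      intro c hc
      rcases List.mem_cons.mp hc with h | h
      · subst h
        exact ⟨by simpa using hd, hs c (by simp) (by simpa using hd)⟩
      · exact hcur c h

lemma pvStrip_id (cs : List Char) (h : ∀ c ∈ cs, PySem.Chars.isspace c = false) :
    PySem.Chars.strip cs = cs := by
  unfold PySem.Chars.strip PySem.Chars.lstrip PySem.Chars.rstrip
  have hdw : ∀ l : List Char, (∀ c ∈ l, PySem.Chars.isspace c = false) →
      l.dropWhile PySem.Chars.isspace = l := by
    intro l hl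
    cases l with
    | nil => rfl
    | cons a l => simp [hl a (by simp)]
  rw [hdw _ h, hdw, List.reverse_reverse]
  intro c hc
  exact h c (List.mem_reverse.mp hc)

-- a word of `match_text.lower().split()` is already lowercase and whitespace-free,
-- so A's per-word `keyword.lower().strip()` is the identity on it
lemma pvWord_fix (mt w : String) (hw : w ∈ PySem.Str.split₀ (PySem.Str.lower mt)) :
    PySem.Str.strip (PySem.Str.lower w) = w := by
  unfold PySem.Str.split₀ at hw
  rcases List.mem_map.mp hw with ⟨cs, hcs, rfl⟩
  have hchars : ∀ c ∈ cs, PySem.Chars.isspace c = false ∧ PySem.Chars.lowerChar c = c := by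
    refine pvGo_chars (fun c => PySem.Chars.lowerChar c = c) _ [] [] ?_ (by simp) (by simp) cs hcs
    intro c hc _
    simp only [PySem.Str.toList_lower, PySem.Chars.lower, List.mem_map] at hc
    rcases hc with ⟨a, _, rfl⟩
    exact pvLowerChar_fix a
  have hlow : PySem.Chars.lower cs = cs := by
    unfold PySem.Chars.lower
    rw [List.map_congr_left (fun c hc => (hchars c hc).2)]
    simp
  apply String.toList_inj.mp
  simp only [PySem.Str.strip, PySem.Str.lower, String.toList_ofList]
  rw [hlow]
  exact pvStrip_id cs (fun c hc => (hchars c hc).1)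

-- A's accumulator loop (started at []) computes B's first-non-empty-filter search
lemma pvSimilar_eq (facts : String) (ws : List String)
    (h : ∀ w ∈ ws, PySem.Str.strip (PySem.Str.lower w) = w) :
    pvSimilarA facts ws [] = pvFirstMatch (pvParseB facts) ws := by
  induction ws with
  | nil => rfl
  | cons w ws ih =>
    have hrest : ∀ x ∈ ws, PySem.Str.strip (PySem.Str.lower x) = x :=
      fun x hx => h x (List.mem_cons_of_mem _ hx)
    simp only [pvSimilarA, pvFirstMatch]
    split
    · rename_i h3
      have hne : w ≠ "" := by
        intro he
        subst he
        rw [PySem.Str.len_eq] at h3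
        simp at h3
      rw [pvExtractA_filter facts w (h w (by simp)) hne]
      rcases hfil : (pvParseB facts).filter (fun n => PySem.Str.isIn w (PySem.Str.lower n)) with _ | ⟨a, l⟩
      · simpa using ih hrest
      · simp
    · exact ih hrest

-- ===== VERDICT (by name: the statement is the Claim_ definition above) =====
theorem format_no_match_with_suggestions_py_spec : Claim_equal_format_no_match_with_suggestions_py := by
  intro mt facts _
  unfold Spec_format_no_match_with_suggestions_py
  unfold format_no_match_with_suggestions_py format_no_match_with_suggestions_py_alt pvBullets
  have hw : ∀ w ∈ (if mt != "" then PySem.Str.split₀ (PySem.Str.lower mt) else []),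
      PySem.Str.strip (PySem.Str.lower w) = w := by
    split
    · exact fun w hw => pvWord_fix mt w hw
    · intro w hw; simp at hw
  simp only [pvSimilar_eq facts _ hw, pvExtractA_empty]
  generalize pvParseB facts = names
  generalize pvFirstMatch names (if mt != "" then PySem.Str.split₀ (PySem.Str.lower mt) else []) = S
  by_cases h1 : S = [] <;> by_cases h2 : names = [] <;>
    simp only [h1, h2, if_pos, if_neg, ne_eq, not_true_eq_false, not_false_eq_true,
      String.append_assoc]
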